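-- pv_equiv track=rewrite | github.com/MicheleSpecchia/probity | src/pmx/portfolio/artifact.py | _resolve_single_hash_field
-- ===== SOURCE A (Python) =====
-- from collections.abc import Mapping, Sequence
-- from typing import Any
--
-- def _resolve_single_hash_field(
--     execution_artifacts: Sequence[Mapping[str, Any]],
--     field_name: str,
-- ) -> tuple[str | None, list[dict[str, str]]]:
--     values = sorted(
--         {
--             value
--             for value in (
--                 _optional_hash(artifact.get(field_name)) for artifact in execution_artifacts
--             )
--             if value is not None
--         }
--     )
--     if not values:
--         return None, []
--     if len(values) == 1:
--         return values[0], []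
--     return None, [
--         {
--             "code": "mixed_hash_values",
--             "field": field_name,
--             "message": f"Input execution artifacts contain mixed hash values for {field_name}.",
--         }
--     ]
--
-- def _optional_text(raw: Any) -> str | None:
--     if raw is None:
--         return None
--     value = str(raw).strip()
--     return value or None
--
-- def _optional_hash(raw: Any) -> str | None:
--     value = _optional_text(raw)
--     if value is None:
--         return None
--     if len(value) != 64 or not all(char in "0123456789abcdef" for char in value):
--         raise ValueError(f"Expected lowercase sha256 hash, got {value!r}")
--     return value
-- ===== SOURCE B (Python) =====
-- def _resolve_single_hash_field(execution_artifacts, field_name):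
--     found = None
--     mixed = False
--     for artifact in execution_artifacts:
--         value = _optional_hash(artifact.get(field_name))
--         if value is not None:
--             if found is None:
--                 found = value
--             elif value != found:
--                 mixed = True
--     if found is None:
--         return None, []
--     if mixed:
--         return None, [
--             {
--                 "code": "mixed_hash_values",
--                 "field": field_name,
--                 "message": f"Input execution artifacts contain mixed hash values for {field_name}.",
--             }
--         ]
--     return found, []
--
--
-- def _optional_text(raw):
--     if raw is None:
--         return None
--     value = str(raw).strip()
--     return value or None
--
--
-- def _optional_hash(raw):
--     value = _optional_text(raw)
--     if value is None:
--         return None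
--     if len(value) != 64 or not all(char in "0123456789abcdef" for char in value):
--         raise ValueError(f"Expected lowercase sha256 hash, got {value!r}")
--     return value
-- ===== Notes on version B (the rewrite author's own statement) =====
-- stated objective: simpler
-- what changed: Replaces the set-comprehension plus sorted() pipeline with one explicit pass that keeps the first hash seen and a mixed flag (no set, no sort), while still validating every artifact so a later invalid hash still raises.
import Mathlib
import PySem

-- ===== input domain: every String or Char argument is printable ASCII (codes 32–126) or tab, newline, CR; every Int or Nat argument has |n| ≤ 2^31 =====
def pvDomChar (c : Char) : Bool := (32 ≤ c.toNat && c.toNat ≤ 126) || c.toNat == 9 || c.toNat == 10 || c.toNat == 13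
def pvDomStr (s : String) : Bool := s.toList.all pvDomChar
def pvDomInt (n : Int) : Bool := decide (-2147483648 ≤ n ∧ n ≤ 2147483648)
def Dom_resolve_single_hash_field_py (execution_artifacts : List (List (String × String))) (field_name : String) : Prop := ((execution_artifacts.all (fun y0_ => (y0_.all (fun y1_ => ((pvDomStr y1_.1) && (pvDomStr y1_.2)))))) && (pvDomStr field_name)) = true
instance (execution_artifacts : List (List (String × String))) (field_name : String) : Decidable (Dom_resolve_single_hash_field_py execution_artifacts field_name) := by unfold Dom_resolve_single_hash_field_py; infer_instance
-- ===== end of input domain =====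

-- B replaces A's set-comprehension + sorted() pipeline with one explicit pass keeping the
-- first hash seen and a mixed flag (objective: simpler); equal on Pre_ (A raises ValueError outside it).

-- ===== PORT A =====
-- _optional_text(raw); raw = none models Python None; 'value or None' (empty string is falsy)
def optional_text_py (raw : Option String) : Option String :=
  match raw with
  | none => none
  | some r =>
      if (PySem.Str.strip r).toList = [] then none else some (PySem.Str.strip r)

-- _optional_hash(raw); outer 'none' = the Python raise ValueError (excluded by Pre_)
def optional_hash_py (raw : Option String) : Option (Option String) :=
  match optional_text_py raw with
  | none => some none
  | some value =>
      if value.toList.length ≠ 64 ∨ ¬ (value.toList.all (fun c => ("0123456789abcdef".toList).contains c) = true)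
      then none  -- raise ValueError
      else some (some value)

-- _optional_hash(artifact.get(field_name)) — this sub-expression occurs in both Pythons
def pvFieldHash (field_name : String) (artifact : List (String × String)) : Option (Option String) :=
  optional_hash_py (PySem.Dict.get? (PySem.Dict.mk artifact) field_name)

-- the mixed_hash_values error dict (identical literal in both Pythons)
def pvMixedError (field_name : String) : List (String × String) :=
  [("code", "mixed_hash_values"),
   ("field", field_name),
   ("message", "Input execution artifacts contain mixed hash values for " ++ field_name ++ ".")]

-- the loop body of A's set-building comprehension
def pvStepA (field_name : String) (acc : Option (PySem.Set String)) (a : List (String × String)) : Option (PySem.Set String) :=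
  match acc, pvFieldHash field_name a with
  | none, _ => none
  | some _, none => none
  | some s, some none => some s
  | some s, some (some v) => some (PySem.Set.add s v)

-- the loop body of B's single pass
def pvStepB (field_name : String) (st : Option String × Bool) (a : List (String × String)) : Option String × Bool :=
  match pvFieldHash field_name a with
  | some (some value) =>
      match st.1 with
      | none => (some value, st.2)
      | some found => (some found, st.2 || decide (value ≠ found))
  | _ => st

def resolve_single_hash_field_py (execution_artifacts : List (List (String × String))) (field_name : String) : Option String × (List (List (String × String))) :=
  -- values = sorted({...}) : build the set over the generator; outer none = a ValueError escaped
  match execution_artifacts.foldl (pvStepA field_name) (some PySem.Set.empty) with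
  | none => (none, [])  -- unreachable under Pre_ (Python raises ValueError)
  | some s =>
      match PySem.List.sorted s (fun x => x) false with
      | [] => (none, [])
      | [v] => (some v, [])
      | _ => (none, [pvMixedError field_name])

-- ===== PORT B =====
def resolve_single_hash_field_py_alt (execution_artifacts : List (List (String × String))) (field_name : String) : Option String × (List (List (String × String))) :=
  -- one pass: (found, mixed); 'some none' = value is None, skipped; 'none' = ValueError (outside Pre_), skipped
  match execution_artifacts.foldl (pvStepB field_name) ((none : Option String), false) with
  | (none, _) => (none, [])
  | (some found, mixed) => if mixed then (none, [pvMixedError field_name]) else (some found, [])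

-- ===== PRECONDITION & SPEC =====
def pvValidHash (r : String) : Prop :=
  (PySem.Str.strip r).toList = [] ∨
  ((PySem.Str.strip r).toList.length = 64 ∧
   (PySem.Str.strip r).toList.all (fun c => ("0123456789abcdef".toList).contains c) = true)

-- Pre_ excludes exactly the inputs where some artifact's field value strips to a non-empty
-- string that is not a 64-char lowercase-hex string: there Python A (and B) raise ValueError.
def Pre_resolve_single_hash_field_py (execution_artifacts : List (List (String × String))) (field_name : String) : Prop :=
  ∀ a ∈ execution_artifacts, ∀ r ∈ PySem.Dict.get? (PySem.Dict.mk a) field_name, pvValidHash r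

instance (execution_artifacts : List (List (String × String))) (field_name : String) : Decidable (Pre_resolve_single_hash_field_py execution_artifacts field_name) := by unfold Pre_resolve_single_hash_field_py pvValidHash; infer_instance

def pvWitness_resolve_single_hash_field_py : (List (List (String × String))) × String :=
  ([[("sha256", "aaaaaaaaaaaaaaaaaaaaaaaaaaaaaaaaaaaaaaaaaaaaaaaaaaaaaaaaaaaaaaaa")], []], "sha256")

def Spec_resolve_single_hash_field_py (execution_artifacts : List (List (String × String))) (field_name : String) (out : Option String × (List (List (String × String)))) : Prop := out = resolve_single_hash_field_py_alt execution_artifacts field_name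
instance (execution_artifacts : List (List (String × String))) (field_name : String) (out : Option String × (List (List (String × String)))) : Decidable (Spec_resolve_single_hash_field_py execution_artifacts field_name out) := by unfold Spec_resolve_single_hash_field_py; infer_instance

-- ===== CLAIM (what is proved, stated in full; the proofs are below) =====
def Claim_equal_resolve_single_hash_field_py : Prop := ∀ (execution_artifacts : List (List (String × String))) (field_name : String), Dom_resolve_single_hash_field_py execution_artifacts field_name → Pre_resolve_single_hash_field_py execution_artifacts field_name → Spec_resolve_single_hash_field_py execution_artifacts field_name (resolve_single_hash_field_py execution_artifacts field_name)

-- ===== LEMMAS AND PROOFS =====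

-- under Pre_, _optional_hash never raises
lemma optional_hash_py_ne_none (r : String) (hv : pvValidHash r) :
    optional_hash_py (some r) ≠ none := by
  unfold pvValidHash at hv
  unfold optional_hash_py
  by_cases he : (PySem.Str.strip r).toList = []
  · have ho : optional_text_py (some r) = none := by
      show (if (PySem.Str.strip r).toList = [] then none else some (PySem.Str.strip r)) = none
      rw [if_pos he]
    rw [ho]
    simp
  · have ho : optional_text_py (some r) = some (PySem.Str.strip r) := by
      show (if (PySem.Str.strip r).toList = [] then none else some (PySem.Str.strip r))
        = some (PySem.Str.strip r)
      rw [if_neg he]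
    rw [ho]
    have hv' : (PySem.Str.strip r).toList.length = 64 ∧
        (PySem.Str.strip r).toList.all (fun c => ("0123456789abcdef".toList).contains c) = true := by
      rcases hv with hv | hv
      · exact absurd hv he
      · exact hv
    have hcond : ¬ ((PySem.Str.strip r).toList.length ≠ 64 ∨
        ¬ ((PySem.Str.strip r).toList.all (fun c => ("0123456789abcdef".toList).contains c) = true)) := by
      intro hc
      rcases hc with hc | hc
      · exact hc hv'.1
      · exact hc hv'.2
    show (if (PySem.Str.strip r).toList.length ≠ 64 ∨
        ¬ ((PySem.Str.strip r).toList.all (fun c => ("0123456789abcdef".toList).contains c) = true)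
        then (none : Option (Option String)) else some (some (PySem.Str.strip r))) ≠ none
    rw [if_neg hcond]
    simp

lemma pvFieldHash_ne_none (field_name : String) (a : List (String × String))
    (h : ∀ r ∈ PySem.Dict.get? (PySem.Dict.mk a) field_name, pvValidHash r) :
    pvFieldHash field_name a ≠ none := by
  unfold pvFieldHash
  cases hg : PySem.Dict.get? (PySem.Dict.mk a) field_name with
  | none => simp [optional_hash_py, optional_text_py]
  | some r => exact optional_hash_py_ne_none r (h r (by simp [hg]))

-- one loop step: the B state computed from A's set is preserved by Set.add
lemma stepB_add (s : List String) (v : String) :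
    (match s.head? with
      | none => (some v, decide (2 ≤ s.length))
      | some found => (some found, decide (2 ≤ s.length) || decide (v ≠ found)))
    = ((PySem.Set.add s v).head?, decide (2 ≤ (PySem.Set.add s v).length)) := by
  cases s with
  | nil => simp [PySem.Set.add, PySem.Set.contains]
  | cons f t =>
      simp only [List.head?_cons]
      by_cases hvf : v = f
      · subst hvf
        simp [PySem.Set.add, PySem.Set.contains]
      · by_cases hmem : v ∈ t
        · have hadd : PySem.Set.add (f :: t) v = f :: t := by
            simp [PySem.Set.add, PySem.Set.contains, hmem]
          rw [hadd]
          cases t with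
          | nil => simp at hmem
          | cons x xs =>
              have hd : 2 ≤ xs.length + 1 + 1 := by omega
              simp [hd]
        · have hadd : PySem.Set.add (f :: t) v = f :: (t ++ [v]) := by
            simp [PySem.Set.add, PySem.Set.contains, hmem, hvf]
          rw [hadd]
          cases t with
          | nil => simp [hvf]
          | cons x xs =>
              have hd : 2 ≤ xs.length + 1 + 1 := by omega
              simp [hd]

-- the loop invariant: A's fold stays 'some' and B's fold tracks (head, ≥2 distinct) of A's set
lemma fold_inv (field_name : String) (xs : List (List (String × String)))
    (hpre : ∀ a ∈ xs, ∀ r ∈ PySem.Dict.get? (PySem.Dict.mk a) field_name, pvValidHash r)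
    (s : List String) :
    ∃ S : List String,
      xs.foldl (pvStepA field_name) (some s) = some S ∧
      xs.foldl (pvStepB field_name) (s.head?, decide (2 ≤ s.length))
        = (S.head?, decide (2 ≤ S.length)) := by
  induction xs generalizing s with
  | nil => exact ⟨s, rfl, rfl⟩
  | cons a xs ih =>
      have ha := hpre a (by simp)
      have hxs : ∀ b ∈ xs, ∀ r ∈ PySem.Dict.get? (PySem.Dict.mk b) field_name, pvValidHash r :=
        fun b hb => hpre b (by simp [hb])
      cases hfa : pvFieldHash field_name a with
      | none => exact absurd hfa (pvFieldHash_ne_none field_name a ha)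
      | some o =>
          cases o with
          | none =>
              obtain ⟨S, h1, h2⟩ := ih hxs s
              refine ⟨S, ?_, ?_⟩
              · simpa [List.foldl_cons, pvStepA, hfa] using h1
              · simpa [List.foldl_cons, pvStepB, hfa] using h2
          | some v =>
              obtain ⟨S, h1, h2⟩ := ih hxs (PySem.Set.add s v)
              refine ⟨S, ?_, ?_⟩
              · simpa [List.foldl_cons, pvStepA, hfa] using h1
              · rw [List.foldl_cons]
                have key : pvStepB field_name (s.head?, decide (2 ≤ s.length)) a
                    = ((PySem.Set.add s v).head?, decide (2 ≤ (PySem.Set.add s v).length)) := by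
                  unfold pvStepB
                  rw [hfa]
                  exact stepB_add s v
                rw [key]
                exact h2

-- sorted of a singleton is itself
lemma sorted_singleton (v : String) :
    PySem.List.sorted [v] (fun x => x) false = [v] :=
  PySem.List.sorted_eq_of_perm_of_pairwise_lt [v] [v] (fun x => x) (List.Perm.refl [v]) (by simp)

-- ===== VERDICT (by name: the statement is the Claim_ definition above) =====
theorem resolve_single_hash_field_py_spec : Claim_equal_resolve_single_hash_field_py := by
  intro xs fn _ hpre
  unfold Spec_resolve_single_hash_field_py resolve_single_hash_field_py resolve_single_hash_field_py_alt
  obtain ⟨S, h1, h2⟩ := fold_inv fn xs hpre PySem.Set.empty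
  have h2' : xs.foldl (pvStepB fn) ((none : Option String), false)
      = (S.head?, decide (2 ≤ S.length)) := by
    simpa [PySem.Set.empty] using h2
  rw [h1, h2']
  cases S with
  | nil => rfl
  | cons a t =>
      cases t with
      | nil => simp [sorted_singleton]
      | cons b r =>
          have hlen : (PySem.List.sorted (a :: b :: r) (fun x : String => x) false).length
              = (a :: b :: r).length := by rw [PySem.List.length_sorted]
          cases hs : PySem.List.sorted (a :: b :: r) (fun x : String => x) false with
          | nil =>
              rw [hs] at hlen
              simp only [List.length_nil, List.length_cons] at hlen
              omega
          | cons x ys =>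
              cases ys with
              | nil =>
                  rw [hs] at hlen
                  simp only [List.length_nil, List.length_cons] at hlen
                  omega
              | cons y zs =>
                  simp [hs]
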